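-- pv_equiv track=rewrite | github.com/mtellene/ProjetMusee | v2/fonctions.py | lister_tous_les_chemins
-- ===== SOURCE A (Python) =====
-- def lister_tous_les_chemins(graph, depart, path=[]):
--     path = path + [depart]  # on ajoute le noeud de depart dans la liste path
--     if not depart in graph: # si le noeud de depart n'est pas dans le graphe
--         return [path]   # alors on return la liste
--     paths = [path]  # sinon, on ajoute la liste path a la liste qui contiendra tous les chemins
--     for noeud in graph[depart]: # on parcourt les successeurs du noeud depart
--         if noeud not in path:   # si le noeud n'est pas dans le chemin
--             newpaths = lister_tous_les_chemins(graph, noeud, path)  # on lance la fonction récursivement en prenant comme depart noeud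
--             for newpath in newpaths:    # on parcourt la liste retournée par l'appel récursif
--                 paths.append(newpath)   # on ajoute les éléments de newpaths dans la liste paths
--     return paths    # on retourne la liste paths (qui contient tous les chemins)
-- ===== SOURCE B (Python) =====
-- def lister_tous_les_chemins(graph, depart, path=[]):
--     result = []
--     stack = [path + [depart]]
--     while stack:
--         q = stack.pop()
--         result.append(q)
--         last = q[-1]
--         if last in graph:
--             children = [q + [n] for n in graph[last] if n not in q]
--             stack.extend(reversed(children))
--     return result
-- ===== Notes on version B (the rewrite author's own statement) =====
-- stated objective: alternative
-- what changed: B replaces A's recursion (each call returning and re-appending its sublists) by an iterative DFS with an explicit stack of partial paths: pop a path, emit it, push its unvisited extensions top-first, which reproduces A's preorder output without recursion.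
import Mathlib
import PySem

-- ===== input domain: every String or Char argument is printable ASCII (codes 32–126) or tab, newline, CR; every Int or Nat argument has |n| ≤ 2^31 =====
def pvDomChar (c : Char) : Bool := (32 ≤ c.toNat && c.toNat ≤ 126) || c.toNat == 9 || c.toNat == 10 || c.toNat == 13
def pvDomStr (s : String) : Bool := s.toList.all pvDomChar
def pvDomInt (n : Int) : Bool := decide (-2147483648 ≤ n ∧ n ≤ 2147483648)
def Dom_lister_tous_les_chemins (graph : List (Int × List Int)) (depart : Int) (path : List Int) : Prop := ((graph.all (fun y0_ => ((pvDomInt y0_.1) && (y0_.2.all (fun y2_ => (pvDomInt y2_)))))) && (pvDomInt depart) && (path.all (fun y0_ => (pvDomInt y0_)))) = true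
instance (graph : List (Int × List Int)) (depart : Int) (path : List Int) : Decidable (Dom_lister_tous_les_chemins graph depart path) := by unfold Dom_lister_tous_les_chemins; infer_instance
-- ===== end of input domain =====

-- B replaces A's recursive enumeration by an iterative DFS over an explicit stack of partial
-- paths (pop, emit, push unvisited extensions top-first); same preorder output, return value only.

-- Shared termination helpers (cited by both ports' decreasing_by).
def pvMeasure (graph : List (Int × List Int)) (d : Int) (p : List Int) : Nat :=
  ((graph.map Prod.fst).filter (fun k => decide (k ∉ p))).length + (if d ∈ p then 1 else 0)

theorem pvFilter_le (p p' K : List Int) (himp : ∀ x : Int, x ∉ p' → x ∉ p) :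
    (K.filter (fun k => decide (k ∉ p'))).length ≤ (K.filter (fun k => decide (k ∉ p))).length := by
  induction K with
  | nil => simp
  | cons a K ih =>
    simp only [List.filter_cons, decide_not] at ih ⊢
    by_cases ha : a ∈ p'
    · by_cases hb : a ∈ p <;> simp [ha, hb] <;> omega
    · have hb : a ∉ p := himp a ha
      simp [ha, hb]; omega

theorem pvFilter_lt (d : Int) (p p' K : List Int) (himp : ∀ x : Int, x ∉ p' → x ∉ p)
    (hdK : d ∈ K) (hdp : d ∉ p) (hdp' : d ∈ p') :
    (K.filter (fun k => decide (k ∉ p'))).length < (K.filter (fun k => decide (k ∉ p))).length := by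
  induction K with
  | nil => cases hdK
  | cons a K ih =>
    simp only [List.filter_cons, decide_not] at ⊢
    by_cases had : a = d
    · subst had
      have h2 : a ∉ p := hdp
      have hle := pvFilter_le p p' K himp
      simp only [decide_not] at hle
      simp [hdp', h2]; omega
    · have hdK' : d ∈ K := by
        rcases List.mem_cons.1 hdK with h | h
        · exact absurd h.symm had
        · exact h
      have ihh := ih hdK'
      simp only [decide_not] at ihh
      by_cases ha : a ∈ p'
      · by_cases hb : a ∈ p <;> simp [ha, hb] <;> omega
      · have hb : a ∉ p := himp a ha
        simp [ha, hb]; omega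

theorem pvMeasure_lt (graph : List (Int × List Int)) (d n : Int) (p p' : List Int)
    (hp' : ∀ x, x ∈ p' ↔ x ∈ p ∨ x = d)
    (hd : d ∈ graph.map Prod.fst) (hn : n ∉ p') :
    pvMeasure graph n p' < pvMeasure graph d p := by
  unfold pvMeasure
  have himp : ∀ x : Int, x ∉ p' → x ∉ p := fun x hx hxp => hx ((hp' x).2 (Or.inl hxp))
  by_cases hdp : d ∈ p
  · have hle := pvFilter_le p p' (graph.map Prod.fst) himp
    simp only [if_neg hn, if_pos hdp]
    omega
  · have hdp' : d ∈ p' := (hp' d).2 (Or.inr rfl)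
    have hlt := pvFilter_lt d p p' (graph.map Prod.fst) himp hd hdp hdp'
    simp only [if_neg hn, if_neg hdp]
    omega

-- ===== PORT A =====
def lister_tous_les_chemins (graph : List (Int × List Int)) (depart : Int) (path : List Int) : List (List Int) :=
  let path2 := path ++ [depart]                 -- path = path + [depart]
  if h : ((PySem.Dict.mk graph).contains depart) = true then
    -- paths = [path]; for noeud in graph[depart]: if noeud not in path: paths += recursive result
    (((PySem.Dict.mk graph).get? depart).getD []).foldl
      (fun paths noeud =>
        if hn : noeud ∈ path2 then paths
        else paths ++ lister_tous_les_chemins graph noeud path2)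
      [path2]
  else [path2]                                  -- if not depart in graph: return [path]
termination_by pvMeasure graph depart path
decreasing_by
  exact pvMeasure_lt graph depart noeud path (path ++ [depart])
    (by intro x; simp [eq_comm])
    (by simpa [PySem.Dict.contains_iff_mem_keys, PySem.Dict.keys] using h) hn

-- ===== PORT B =====
-- Termination of the stack loop: |q| can only grow, so we weight each stack entry q by
-- B^(pvMu graph q), B = pvS graph + 1; popping q pushes at most pvS entries of strictly
-- smaller pvMu, so the total weight strictly decreases.
def pvKeysOut (graph : List (Int × List Int)) (q : List Int) : Nat :=
  ((graph.map Prod.fst).filter (fun k => decide (k ∉ q))).length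

def pvMu (graph : List (Int × List Int)) (q : List Int) : Nat :=
  2 * pvKeysOut graph q +
    (match PySem.List.pyGet? q (-1) with
     | none => 0
     | some l => if ((PySem.Dict.mk graph).contains l) = true then 1 else 0)

def pvS (graph : List (Int × List Int)) : Nat := (graph.map (fun e => e.2.length)).sum

def pvM (graph : List (Int × List Int)) (stack : List (List Int)) : Nat :=
  (stack.map (fun q => (pvS graph + 1) ^ pvMu graph q)).sum

theorem pvMu_lt (graph : List (Int × List Int)) (q : List Int) (lastv n : Int)
    (h : PySem.List.pyGet? q (-1) = some lastv)
    (hc : ((PySem.Dict.mk graph).contains lastv) = true)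
    (hn : n ∉ q) : pvMu graph (q ++ [n]) < pvMu graph q := by
  have himp : ∀ x : Int, x ∉ q ++ [n] → x ∉ q := by intro x hx hxq; exact hx (by simp [hxq])
  unfold pvMu pvKeysOut
  rw [h, PySem.List.pyGet?_neg_one_append_singleton]
  simp only [hc, if_true]
  by_cases hcn : ((PySem.Dict.mk graph).contains n) = true
  · have hnk : n ∈ graph.map Prod.fst := by
      simpa [PySem.Dict.contains_iff_mem_keys, PySem.Dict.keys] using hcn
    have := pvFilter_lt n q (q ++ [n]) (graph.map Prod.fst) himp hnk hn (by simp)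
    simp only [hcn, if_true]
    omega
  · have := pvFilter_le q (q ++ [n]) (graph.map Prod.fst) himp
    rw [if_neg hcn]
    omega

theorem pvGetD_len_le (graph : List (Int × List Int)) (k : Int) :
    (((PySem.Dict.mk graph).get? k).getD []).length ≤ pvS graph := by
  induction graph with
  | nil => simp [PySem.Dict.get?, pvS]
  | cons e graph ih =>
    by_cases he : e.1 = k
    · simp only [pvS, List.map_cons, List.sum_cons]
      simp [PySem.Dict.get?, he]
    · have h2 : ((PySem.Dict.mk (e :: graph)).get? k) = ((PySem.Dict.mk graph).get? k) := by
        simp [PySem.Dict.get?, he]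
      rw [h2]
      have hle : pvS graph ≤ pvS (e :: graph) := by
        simp only [pvS, List.map_cons, List.sum_cons]; omega
      omega

theorem pvSum_pow_le (B em : Nat) (hB : 0 < B) : ∀ xs : List Nat, (∀ x ∈ xs, x ≤ em) →
    (xs.map (fun x => B ^ x)).sum ≤ xs.length * B ^ em := by
  intro xs
  induction xs with
  | nil => simp
  | cons a xs ih =>
    intro hx
    have ha : B ^ a ≤ B ^ em := Nat.pow_le_pow_right hB (hx a (by simp))
    have ihh := ih (fun x hx' => hx x (by simp [hx']))
    simp only [List.map_cons, List.sum_cons, List.length_cons]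
    calc B ^ a + (xs.map (fun x => B ^ x)).sum ≤ B ^ em + xs.length * B ^ em := by omega
      _ = (xs.length + 1) * B ^ em := by ring

theorem pvSum_pow_lt (B e : Nat) (xs : List Nat) (hlen : xs.length < B)
    (hx : ∀ x ∈ xs, x < e) (he : 0 < e) : (xs.map (fun x => B ^ x)).sum < B ^ e := by
  have hB : 0 < B := Nat.lt_of_le_of_lt (Nat.zero_le _) hlen
  have hsum := pvSum_pow_le B (e - 1) hB xs (fun x hx' => by have := hx x hx'; omega)
  have hpow : 0 < B ^ (e - 1) := Nat.pow_pos hB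
  have h2 : xs.length * B ^ (e - 1) < B * B ^ (e - 1) :=
    Nat.mul_lt_mul_of_lt_of_le hlen (le_refl _) hpow
  have h3 : B * B ^ (e - 1) = B ^ e := by
    rw [← pow_succ']
    congr 1
    omega
  omega

theorem pvM_push_lt (graph : List (Int × List Int)) (q : List Int) (lastv : Int)
    (h : PySem.List.pyGet? q (-1) = some lastv)
    (hc : ((PySem.Dict.mk graph).contains lastv) = true) :
    ((((((PySem.Dict.mk graph).get? lastv).getD []).filter (fun n => decide (n ∉ q))).map
        (fun n => q ++ [n])).map (fun q' => (pvS graph + 1) ^ pvMu graph q')).sum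
      < (pvS graph + 1) ^ pvMu graph q := by
  rw [List.map_map]
  have hmu0 : 0 < pvMu graph q := by
    unfold pvMu; rw [h]; simp [hc]
  have := pvSum_pow_lt (pvS graph + 1) (pvMu graph q)
    (((((PySem.Dict.mk graph).get? lastv).getD []).filter (fun n => decide (n ∉ q))).map
      (fun n => pvMu graph (q ++ [n])))
    (by
      have h1 := pvGetD_len_le graph lastv
      have h2 := List.length_filter_le (fun n => decide (n ∉ q)) (((PySem.Dict.mk graph).get? lastv).getD [])
      simp only [List.length_map]
      omega)
    (by
      intro x hx
      simp only [List.mem_map, List.mem_filter] at hx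
      obtain ⟨n, ⟨_, hn⟩, rfl⟩ := hx
      exact pvMu_lt graph q lastv n h hc (by simpa using hn))
    hmu0
  simpa [List.map_map, Function.comp] using this

-- The stack loop: pop q (head = top of stack), emit it, push the unvisited extensions
-- [q + [n] for n in graph[q[-1]] if n not in q] so that the first one is popped next.
def pvLoop (graph : List (Int × List Int)) (stack : List (List Int)) (acc : List (List Int)) : List (List Int) :=
  match stack with
  | [] => acc
  | q :: rest =>
    match hl : PySem.List.pyGet? q (-1) with    -- last = q[-1]  (q is never empty here)
    | none => pvLoop graph rest (acc ++ [q])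
    | some lastv =>
      if hc : ((PySem.Dict.mk graph).contains lastv) = true then
        pvLoop graph
          (((((PySem.Dict.mk graph).get? lastv).getD []).filter (fun n => decide (n ∉ q))).map
              (fun n => q ++ [n]) ++ rest)
          (acc ++ [q])
      else pvLoop graph rest (acc ++ [q])
termination_by pvM graph stack
decreasing_by
  · have h1 : 0 < (pvS graph + 1) ^ pvMu graph q := Nat.pow_pos (by omega)
    simp only [pvM, List.map_cons, List.sum_cons]; omega
  · have := pvM_push_lt graph q lastv hl hc
    simp only [pvM, List.map_append, List.sum_append, List.map_cons, List.sum_cons]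
    omega
  · have h1 : 0 < (pvS graph + 1) ^ pvMu graph q := Nat.pow_pos (by omega)
    simp only [pvM, List.map_cons, List.sum_cons]; omega

def lister_tous_les_chemins_alt (graph : List (Int × List Int)) (depart : Int) (path : List Int) : List (List Int) :=
  pvLoop graph [path ++ [depart]] []            -- result = []; stack = [path + [depart]]; while stack: …

-- ===== PRECONDITION & SPEC =====
def Spec_lister_tous_les_chemins (graph : List (Int × List Int)) (depart : Int) (path : List Int) (out : List (List Int)) : Prop := out = lister_tous_les_chemins_alt graph depart path
instance (graph : List (Int × List Int)) (depart : Int) (path : List Int) (out : List (List Int)) : Decidable (Spec_lister_tous_les_chemins graph depart path out) := by unfold Spec_lister_tous_les_chemins; infer_instance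

-- ===== CLAIM (what is proved, stated in full; the proofs are below) =====
def Claim_equal_lister_tous_les_chemins : Prop := ∀ (graph : List (Int × List Int)) (depart : Int) (path : List Int), Dom_lister_tous_les_chemins graph depart path → Spec_lister_tous_les_chemins graph depart path (lister_tous_les_chemins graph depart path)

-- ===== LEMMAS AND PROOFS =====

-- A's accumulation loop as an explicit flatMap over the kept successors.
theorem pvFoldl_dif (q : List Int) (g : Int → List (List Int)) :
    ∀ (l : List Int) (init : List (List Int)),
      l.foldl (fun paths n => if _hn : n ∈ q then paths else paths ++ g n) init
        = init ++ (l.filter (fun n => decide (n ∉ q))).flatMap g := by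
  intro l
  induction l with
  | nil => intro init; simp
  | cons n l ih =>
    intro init
    by_cases hn : n ∈ q
    · rw [List.foldl_cons, dif_pos hn]
      have hf : (List.filter (fun m => decide (m ∉ q)) (n :: l))
          = List.filter (fun m => decide (m ∉ q)) l := by simp [hn]
      rw [hf]
      exact ih init
    · rw [List.foldl_cons, dif_neg hn]
      have hf : (List.filter (fun m => decide (m ∉ q)) (n :: l))
          = n :: List.filter (fun m => decide (m ∉ q)) l := by simp [hn]
      rw [hf, ih (init ++ g n)]
      simp [List.append_assoc]

-- Popping a path p ++ [d] emits exactly A's recursive enumeration from d, then the rest runs.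
theorem pvLoop_emit (N : Nat) : ∀ (graph : List (Int × List Int)) (p : List Int) (d : Int)
    (rest acc : List (List Int)), pvMu graph (p ++ [d]) ≤ N →
    pvLoop graph ((p ++ [d]) :: rest) acc
      = pvLoop graph rest (acc ++ lister_tous_les_chemins graph d p) := by
  induction N using Nat.strong_induction_on with
  | _ N IH =>
    intro graph p d rest acc hN
    rw [pvLoop.eq_def]
    simp only
    rw [PySem.List.pyGet?_neg_one_append_singleton]
    simp only
    rw [lister_tous_les_chemins]
    by_cases hc : ((PySem.Dict.mk graph).contains d) = true
    · simp only [dif_pos hc]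
      rw [pvFoldl_dif (p ++ [d]) (fun n => lister_tous_les_chemins graph n (p ++ [d]))]
      have key : ∀ (fl : List Int) (acc2 : List (List Int)), (∀ n ∈ fl, n ∉ p ++ [d]) →
          pvLoop graph (fl.map (fun n => (p ++ [d]) ++ [n]) ++ rest) acc2
            = pvLoop graph rest
                (acc2 ++ fl.flatMap (fun n => lister_tous_les_chemins graph n (p ++ [d]))) := by
        intro fl
        induction fl with
        | nil => intro acc2 _; simp
        | cons n fl ihfl =>
          intro acc2 hfl
          have hn : n ∉ p ++ [d] := hfl n (by simp)
          have hmu : pvMu graph ((p ++ [d]) ++ [n]) < pvMu graph (p ++ [d]) :=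
            pvMu_lt graph (p ++ [d]) d n
              (PySem.List.pyGet?_neg_one_append_singleton p d) hc hn
          simp only [List.map_cons, List.cons_append]
          rw [IH (pvMu graph ((p ++ [d]) ++ [n])) (by omega) graph (p ++ [d]) n _ acc2 (le_refl _)]
          rw [ihfl _ (fun m hm => hfl m (by simp [hm]))]
          simp [List.append_assoc]
      have hfl : ∀ n ∈ ((((PySem.Dict.mk graph).get? d).getD []).filter
          (fun n => decide (n ∉ p ++ [d]))), n ∉ p ++ [d] := by
        intro n hn
        simpa using (List.mem_filter.1 hn).2
      rw [key _ (acc ++ [p ++ [d]]) hfl]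
      simp [List.append_assoc]
    · simp only [dif_neg hc]

-- ===== VERDICT (by name: the statement is the Claim_ definition above) =====
theorem lister_tous_les_chemins_spec : Claim_equal_lister_tous_les_chemins := by
  intro graph depart path _
  unfold Spec_lister_tous_les_chemins lister_tous_les_chemins_alt
  rw [pvLoop_emit (pvMu graph (path ++ [depart])) graph path depart [] [] (le_refl _)]
  rw [pvLoop]
  simp
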